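-- pv_equiv track=rewrite | github.com/Jeanlukamc/HelloCFG | CYK_Parser.py | html_input_tokenizer
-- ===== SOURCE A (Python) =====
-- def html_input_tokenizer( file_input ):
--     """Tokenizes the input in the context for html"""
--     lookout_chars = ["<", ">", "/"]
--
--     tokens = []
--     current_token = ""
--     inside_tag = False
--
--     for char in file_input:
--         if ( char in lookout_chars ):
--             if ( current_token != "" ):
--                 if ( not inside_tag ):
--                     tokens += process_text_tokens( current_token )
--                 else:
--                     tokens += [current_token.strip( )]
--
--                 current_token = ""
--             tokens.append( char )
--
--             if ( char == "<" ):
--                 inside_tag = True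
--             elif ( char == ">" ):
--                 inside_tag = False
--         else:
--             current_token += char
--
--     if ( current_token != "" ):
--         if ( not inside_tag ):
--             tokens += process_text_tokens( current_token )
--         else:
--             tokens.append( current_token )
--
--     final_tokens = []
--     for index in range( 0, len( tokens ) ):
--         if ( '="' in tokens[ index ] ):
--             final_tokens +=  process_attributes( tokens[ index ] )
--         else:
--             final_tokens.append( tokens[ index ] )
--     return( final_tokens )
--
-- def process_attributes( token ):
--     """Trims appropriately the token to be valid for the parser, excluding all whitespace"""
--     new_tokens = []
--
--     inside_quotes = False
--     current_token = ""
--     for char in token: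
--         #If we found a space outside quotes and we have something to tokenize, copy the token and reset it
--         if ( char == ' ' and current_token != "" and not inside_quotes ):
--             new_tokens.append( current_token )
--             current_token = ""
--         #If not a space or the start of a quote as well as outside quotes, add the character
--         elif ( char != ' ' and char != '"' and not inside_quotes):
--             current_token += char
--         #If found the first quote, add the character
--         #Add the token, reset, and set inside quotes as true
--         elif( char == '"' and not inside_quotes ):
--             current_token += char
--             new_tokens.append( current_token )
--             current_token = ""
--             inside_quotes = True
--         #If we are inside the quote
--         elif ( inside_quotes == True ):
--             #If we haven't found the ending quote, keep adding
--             if( char != '"'):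
--                 current_token += char
--             #If we did, add the token and the quote separately and reset
--             #Set inside quotes as false
--             else:
--                 new_tokens += process_text_tokens( current_token )
--                 new_tokens.append( char )
--                 current_token = ""
--                 inside_quotes = False
--     return( new_tokens )
--
-- def process_text_tokens( token ):
--     """Trim text tokens to individual characters, excluding whitespace"""
--
--     text_tokens = []
--     for char in token:
--         if ( char != " " ):
--             text_tokens.append( char )
--     return( text_tokens )
-- ===== SOURCE B (Python) =====
-- import re
--
--
-- def html_input_tokenizer(file_input):
--     """Tokenizes the input in the context for html, by splitting on the delimiters."""
--     # re.split with a captured group keeps the delimiters: the list alternates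
--     # text, delimiter, text, ..., delimiter, text.
--     parts = re.split(r"([<>/])", file_input)
--     tail = parts.pop()
--
--     tokens = []
--     inside_tag = False
--     for text, delim in zip(parts[0::2], parts[1::2]):
--         if text:
--             tokens += [text.strip()] if inside_tag else text_chars(text)
--         tokens.append(delim)
--         inside_tag = delim == "<" or (inside_tag and delim != ">")
--     if tail:
--         tokens += [tail] if inside_tag else text_chars(tail)
--
--     final_tokens = []
--     for token in tokens:
--         final_tokens += attribute_tokens(token) if '="' in token else [token]
--     return final_tokens
--
--
-- def text_chars(token):
--     """Individual non-space characters of a text token."""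
--     return [char for char in token if char != " "]
--
--
-- def attribute_tokens(token):
--     """Trims appropriately the token to be valid for the parser, excluding all whitespace"""
--     new_tokens = []
--     inside_quotes = False
--     current_token = ""
--     for char in token:
--         if char == ' ' and current_token != "" and not inside_quotes:
--             new_tokens.append(current_token)
--             current_token = ""
--         elif char != ' ' and char != '"' and not inside_quotes:
--             current_token += char
--         elif char == '"' and not inside_quotes:
--             current_token += char
--             new_tokens.append(current_token)
--             current_token = ""
--             inside_quotes = True
--         elif inside_quotes:
--             if char != '"':
--                 current_token += char
--             else:
--                 new_tokens += text_chars(current_token)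
--                 new_tokens.append(char)
--                 current_token = ""
--                 inside_quotes = False
--     return new_tokens
-- ===== Notes on version B (the rewrite author's own statement) =====
-- stated objective: alternative
-- what changed: B replaces A's single stateful character-by-character loop (accumulate current_token, flush on each delimiter) by a two-phase decomposition: re.split on the delimiter class with the delimiters kept, then one pass over the (text, delimiter) pairs plus the trailing remainder; the attribute-expansion pass is kept.
import Mathlib
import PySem

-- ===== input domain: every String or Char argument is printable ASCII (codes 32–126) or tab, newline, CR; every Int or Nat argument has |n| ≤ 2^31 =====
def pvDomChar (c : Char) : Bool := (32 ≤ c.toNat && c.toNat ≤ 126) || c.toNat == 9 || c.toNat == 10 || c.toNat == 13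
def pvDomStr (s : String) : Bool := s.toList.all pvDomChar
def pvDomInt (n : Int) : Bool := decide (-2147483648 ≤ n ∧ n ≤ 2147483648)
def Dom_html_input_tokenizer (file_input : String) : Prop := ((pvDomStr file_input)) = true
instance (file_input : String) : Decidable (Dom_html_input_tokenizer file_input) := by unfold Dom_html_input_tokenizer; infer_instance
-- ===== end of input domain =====

-- B re-decomposes the tokenizer: split on the kept delimiters first, then one pass over
-- the (text, delimiter) pairs and the trailing remainder; same output, alternative structure.

-- ===== PORT A =====
-- char in lookout_chars  (["<", ">", "/"])
def pvDelim (c : Char) : Bool := c == '<' || c == '>' || c == '/'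

-- process_text_tokens: loop appending each non-space character (A's version)
def processTextTokens (token : List Char) : List (List Char) :=
  token.foldl (fun acc c => if c != ' ' then acc ++ [[c]] else acc) []

-- process_attributes / attribute_tokens (identical code in A and Source B; defined once)
def processAttributes (token : List Char) : List (List Char) :=
  let fin := token.foldl
    (fun (st : List (List Char) × List Char × Bool) c =>
      let (new_tokens, current, inside_quotes) := st
      if c == ' ' && current != [] && !inside_quotes then
        (new_tokens ++ [current], [], inside_quotes)
      else if c != ' ' && c != '"' && !inside_quotes then
        (new_tokens, current ++ [c], inside_quotes)
      else if c == '"' && !inside_quotes then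
        (new_tokens ++ [current ++ [c]], [], true)
      else if inside_quotes then
        (if c != '"' then (new_tokens, current ++ [c], inside_quotes)
         else (new_tokens ++ processTextTokens current ++ [[c]], [], false))
      else (new_tokens, current, inside_quotes))
    ([], [], false)
  fin.1

-- the final '="' expansion loop (identical code in A and Source B; defined once)
def finalPass (tokens : List (List Char)) : List (List Char) :=
  tokens.foldl
    (fun final_tokens t =>
      if PySem.Chars.isIn ['=', '"'] t then final_tokens ++ processAttributes t
      else final_tokens ++ [t]) []

-- the body of A's main character loop, on state (tokens, current_token, inside_tag)
def stepA (st : List (List Char) × List Char × Bool) (c : Char) :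
    List (List Char) × List Char × Bool :=
  if pvDelim c then
    let tokens :=
      if st.2.1 != [] then
        (if !st.2.2 then st.1 ++ processTextTokens st.2.1
         else st.1 ++ [PySem.Chars.strip st.2.1])
      else st.1
    (tokens ++ [[c]], [],
     if c == '<' then true else if c == '>' then false else st.2.2)
  else (st.1, st.2.1 ++ [c], st.2.2)

def html_input_tokenizer (file_input : String) : List String :=
  let fin := file_input.toList.foldl stepA ([], [], false)
  let tokens :=
    if fin.2.1 != [] then
      (if !fin.2.2 then fin.1 ++ processTextTokens fin.2.1 else fin.1 ++ [fin.2.1])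
    else fin.1
  (finalPass tokens).map String.ofList

-- ===== PORT B =====
-- text_chars: comprehension — filter then map (Source B's version)
def textChars (token : List Char) : List (List Char) :=
  (token.filter (fun c => c != ' ')).map (fun c => [c])

-- re.split(r"([<>/])", s) with parts.pop(): the (text, delimiter) pairs and the tail
def rsplit : List Char → List (List Char × Char) × List Char
  | [] => ([], [])
  | c :: cs =>
    let (ps, t) := rsplit cs
    if pvDelim c then (([], c) :: ps, t)
    else
      match ps with
      | [] => ([], c :: t)
      | (txt, d) :: rest => ((c :: txt, d) :: rest, t)

-- body of B's loop over the zipped (text, delim) pairs, on state (tokens, inside_tag)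
def stepB (st : List (List Char) × Bool) (p : List Char × Char) : List (List Char) × Bool :=
  (st.1 ++
     (if p.1 != [] then
        (if st.2 then [PySem.Chars.strip p.1] else textChars p.1)
      else []) ++ [[p.2]],
   p.2 == '<' || (st.2 && p.2 != '>'))

-- the trailing remainder's tokens (Source B's `if tail:` block)
def tailTokens (tail : List Char) (inside : Bool) : List (List Char) :=
  if tail != [] then (if inside then [tail] else textChars tail) else []

-- Source B's final loop: final_tokens += attribute_tokens(token) if '="' in token else [token]
def finalPassB (tokens : List (List Char)) : List (List Char) :=
  tokens.foldl
    (fun final_tokens t =>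
      final_tokens ++
        (if PySem.Chars.isIn ['=', '"'] t then processAttributes t else [t])) []

def html_input_tokenizer_alt (file_input : String) : List String :=
  let sp := rsplit file_input.toList
  let fin := sp.1.foldl stepB ([], false)
  (finalPassB (fin.1 ++ tailTokens sp.2 fin.2)).map String.ofList

-- ===== PRECONDITION & SPEC =====
def Spec_html_input_tokenizer (file_input : String) (out : List String) : Prop := out = html_input_tokenizer_alt file_input
instance (file_input : String) (out : List String) : Decidable (Spec_html_input_tokenizer file_input out) := by unfold Spec_html_input_tokenizer; infer_instance

-- ===== CLAIM (what is proved, stated in full; the proofs are below) =====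
def Claim_equal_html_input_tokenizer : Prop := ∀ (file_input : String), Dom_html_input_tokenizer file_input → Spec_html_input_tokenizer file_input (html_input_tokenizer file_input)

-- ===== LEMMAS AND PROOFS =====

-- A's and B's text-token helpers agree
theorem textTokens_eq (t : List Char) : processTextTokens t = textChars t :=
  PySem.List.foldl_append_if (fun c => c != ' ') (fun c => [c]) t []

-- A's inside_tag update, as a function
def updA (c : Char) (inside : Bool) : Bool :=
  if c == '<' then true else if c == '>' then false else inside

theorem updA_eq_insB (c : Char) (inside : Bool) (h : pvDelim c = true) :
    updA c inside = (c == '<' || (inside && c != '>')) := by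
  unfold updA
  by_cases h1 : c = '<'
  · simp [h1]
  · by_cases h2 : c = '>'
    · simp [h2]
    · have h3 : c = '/' := by simpa [pvDelim, h1, h2] using h
      simp [h3]

-- flushes of A's pending current token: mid-loop (strip) and end-of-input (raw)
def flushMid (cur : List Char) (inside : Bool) : List (List Char) :=
  if cur != [] then
    (if !inside then processTextTokens cur else [PySem.Chars.strip cur])
  else []

def flushEnd (cur : List Char) (inside : Bool) : List (List Char) :=
  if cur != [] then (if !inside then processTextTokens cur else [cur]) else []

-- A's loop continued from state (cur, inside), including the post-loop flush
def runA : List Char → List Char → Bool → List (List Char)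
  | [], cur, inside => flushEnd cur inside
  | c :: cs, cur, inside =>
    if pvDelim c then flushMid cur inside ++ [[c]] ++ runA cs [] (updA c inside)
    else runA cs (cur ++ [c]) inside

theorem runA_cons_delim (c : Char) (cs : List Char) (cur : List Char) (inside : Bool)
    (hd : pvDelim c = true) :
    runA (c :: cs) cur inside = flushMid cur inside ++ [[c]] ++ runA cs [] (updA c inside) := by
  rw [runA.eq_def]; simp [hd]

theorem runA_cons_text (c : Char) (cs : List Char) (cur : List Char) (inside : Bool)
    (hd : pvDelim c = false) :
    runA (c :: cs) cur inside = runA cs (cur ++ [c]) inside := by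
  rw [runA.eq_def]; simp [hd]

-- A's fold + post-loop flush = tokens ++ runA
theorem foldA_runA (cs : List Char) (tokens : List (List Char)) (cur : List Char) (inside : Bool) :
    (cs.foldl stepA (tokens, cur, inside)).1 ++
      flushEnd (cs.foldl stepA (tokens, cur, inside)).2.1
        (cs.foldl stepA (tokens, cur, inside)).2.2 =
    tokens ++ runA cs cur inside := by
  induction cs generalizing tokens cur inside with
  | nil => simp [runA]
  | cons c cs ih =>
    by_cases hd : pvDelim c = true
    · have hstep : stepA (tokens, cur, inside) c =
          (tokens ++ flushMid cur inside ++ [[c]], [], updA c inside) := by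
        unfold stepA flushMid updA
        simp only [hd, if_true]
        split_ifs <;> simp_all
      rw [List.foldl_cons, hstep, ih, runA_cons_delim c cs cur inside hd]
      simp [List.append_assoc]
    · have hstep : stepA (tokens, cur, inside) c = (tokens, cur ++ [c], inside) := by
        unfold stepA
        simp [hd]
      have hd' : pvDelim c = false := by revert hd; cases pvDelim c <;> simp
      rw [List.foldl_cons, hstep, ih, runA_cons_text c cs cur inside hd']

-- B's emission over the split, phrased with A's flush/update helpers
def goPairs : List (List Char × Char) → List Char → List Char → Bool → List (List Char)
  | [], tail, cur, inside => flushEnd (cur ++ tail) inside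
  | (t, d) :: ps, tail, cur, inside =>
    flushMid (cur ++ t) inside ++ [[d]] ++ goPairs ps tail [] (updA d inside)

-- A's remaining run = the emission over the split of the remaining input
theorem runA_eq_goPairs (cs : List Char) (cur : List Char) (inside : Bool) :
    runA cs cur inside = goPairs (rsplit cs).1 (rsplit cs).2 cur inside := by
  induction cs generalizing cur inside with
  | nil => simp [runA, rsplit, goPairs]
  | cons c cs ih =>
    rcases hsp : rsplit cs with ⟨ps, t⟩
    by_cases hd : pvDelim c = true
    · have hsp' : rsplit (c :: cs) = (([], c) :: ps, t) := by
        rw [rsplit.eq_def]; simp [hd, hsp]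
      rw [runA_cons_delim c cs cur inside hd, ih, hsp, hsp']
      simp [goPairs]
    · have hd' : pvDelim c = false := by revert hd; cases pvDelim c <;> simp
      rw [runA_cons_text c cs cur inside hd', ih, hsp]
      cases ps with
      | nil =>
        have hsp' : rsplit (c :: cs) = ([], c :: t) := by
          rw [rsplit.eq_def]; simp [hd', hsp]
        rw [hsp']
        simp [goPairs, List.append_assoc]
      | cons p rest =>
        obtain ⟨txt, d⟩ := p
        have hsp' : rsplit (c :: cs) = ((c :: txt, d) :: rest, t) := by
          rw [rsplit.eq_def]; simp [hd', hsp]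
        rw [hsp']
        simp [goPairs, List.append_assoc]

-- every delimiter produced by rsplit really is a delimiter
theorem rsplit_delim (cs : List Char) : ∀ p ∈ (rsplit cs).1, pvDelim p.2 = true := by
  induction cs with
  | nil => simp [rsplit]
  | cons c cs ih =>
    rcases hsp : rsplit cs with ⟨ps, t⟩
    rw [hsp] at ih
    intro p hp
    rw [rsplit.eq_def] at hp
    by_cases hd : pvDelim c = true
    · simp only [hd, hsp, if_true, List.mem_cons] at hp
      rcases hp with h | h
      · rw [h]; exact hd
      · exact ih p h
    · have hd' : pvDelim c = false := by revert hd; cases pvDelim c <;> simp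
      simp only [hd', hsp, Bool.false_eq_true, if_false] at hp
      cases ps with
      | nil => simp at hp
      | cons q rest =>
        obtain ⟨txt, d⟩ := q
        simp only [List.mem_cons] at hp
        rcases hp with h | h
        · rw [h]; exact ih (txt, d) (by simp)
        · exact ih p (List.mem_cons_of_mem _ h)

-- the two phrasings of the final expansion pass agree
theorem finalPassB_eq (tokens : List (List Char)) : finalPassB tokens = finalPass tokens := by
  unfold finalPassB finalPass
  congr 1
  funext acc t
  split_ifs <;> rfl

-- B's fold + tail flush = tokens ++ goPairs (for delimiter-pure pairs)
theorem foldB_goPairs (ps : List (List Char × Char)) (tail : List Char)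
    (tokens : List (List Char)) (inside : Bool)
    (hdel : ∀ p ∈ ps, pvDelim p.2 = true) :
    (ps.foldl stepB (tokens, inside)).1 ++
      tailTokens tail (ps.foldl stepB (tokens, inside)).2 =
    tokens ++ goPairs ps tail [] inside := by
  induction ps generalizing tokens inside with
  | nil =>
    simp only [List.foldl_nil, goPairs, List.nil_append, flushEnd, tailTokens]
    split_ifs <;> simp_all [textTokens_eq]
  | cons p ps ih =>
    obtain ⟨t, d⟩ := p
    have hd : pvDelim d = true := hdel (t, d) (List.mem_cons_self ..)
    have hstep : stepB (tokens, inside) (t, d) =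
        (tokens ++ flushMid t inside ++ [[d]], updA d inside) := by
      unfold stepB flushMid
      rw [updA_eq_insB d inside hd]
      split_ifs <;> simp_all [textTokens_eq]
    rw [List.foldl_cons, hstep, ih _ _ (fun q hq => hdel q (List.mem_cons_of_mem _ hq))]
    simp [goPairs, List.append_assoc]

-- ===== VERDICT (by name: the statement is the Claim_ definition above) =====
theorem html_input_tokenizer_spec : Claim_equal_html_input_tokenizer := by
  intro file_input _
  unfold Spec_html_input_tokenizer html_input_tokenizer html_input_tokenizer_alt
  rcases hsp : rsplit file_input.toList with ⟨ps, tail⟩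
  have hA := foldA_runA file_input.toList [] [] false
  simp only [List.nil_append] at hA
  rw [runA_eq_goPairs, hsp] at hA
  have hB := foldB_goPairs ps tail [] false (by
    intro p hp
    have := rsplit_delim file_input.toList
    rw [hsp] at this
    exact this p hp)
  simp only [List.nil_append] at hB
  apply congrArg (List.map String.ofList)
  rw [finalPassB_eq]
  apply congrArg finalPass
  rw [show (if (file_input.toList.foldl stepA ([], [], false)).2.1 != [] then
        (if !(file_input.toList.foldl stepA ([], [], false)).2.2 then
          (file_input.toList.foldl stepA ([], [], false)).1 ++
            processTextTokens (file_input.toList.foldl stepA ([], [], false)).2.1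
         else (file_input.toList.foldl stepA ([], [], false)).1 ++
            [(file_input.toList.foldl stepA ([], [], false)).2.1])
      else (file_input.toList.foldl stepA ([], [], false)).1) =
      (file_input.toList.foldl stepA ([], [], false)).1 ++
        flushEnd (file_input.toList.foldl stepA ([], [], false)).2.1
          (file_input.toList.foldl stepA ([], [], false)).2.2 by
    unfold flushEnd; split_ifs <;> simp_all]
  rw [hA, ← hB]
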